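-- pv_equiv track=rewrite | github.com/sbu-dsl/stonybook | stonybook/pipeline/character_annotation/character_clustering.py | merge_consecutive
-- ===== SOURCE A (Python) =====
-- def merge_consecutive(l):
--     prev_num = -1
--     curr_text = ''
--     curr_toks = list()
--     ans = list()
--     for num, text in l:
--         if prev_num == num - 1:
--             curr_text += ' ' + text
--             curr_toks.append(num)
--         else:
--             if len(curr_toks) > 0:
--                 ans.append([curr_toks, curr_text.strip()])
--             curr_text = text
--             curr_toks = [num]
--         prev_num = num
--
--     if len(curr_toks) > 0:
--         ans.append([curr_toks, curr_text.strip()])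
--     return ans
-- ===== SOURCE B (Python) =====
-- def merge_consecutive(l):
--     # Run-at-a-time decomposition: scan out each maximal consecutive-number run,
--     # then build its group from the slice, instead of threading prev/curr state.
--     ans = []
--     i = 0
--     n = len(l)
--     while i < n:
--         j = i + 1
--         while j < n and l[j][0] == l[j - 1][0] + 1:
--             j += 1
--         run = l[i:j]
--         ans.append([[num for num, _ in run], ' '.join(t for _, t in run).strip()])
--         i = j
--     return ans
-- ===== Notes on version B (the rewrite author's own statement) =====
-- stated objective: alternative
-- what changed: Replaced the running prev_num/curr_text/curr_toks accumulator loop by a run-at-a-time decomposition: an index scan finds each maximal consecutive-number run, and the group (token list and ' '.join(...).strip() text) is built from that slice.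
import Mathlib
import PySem

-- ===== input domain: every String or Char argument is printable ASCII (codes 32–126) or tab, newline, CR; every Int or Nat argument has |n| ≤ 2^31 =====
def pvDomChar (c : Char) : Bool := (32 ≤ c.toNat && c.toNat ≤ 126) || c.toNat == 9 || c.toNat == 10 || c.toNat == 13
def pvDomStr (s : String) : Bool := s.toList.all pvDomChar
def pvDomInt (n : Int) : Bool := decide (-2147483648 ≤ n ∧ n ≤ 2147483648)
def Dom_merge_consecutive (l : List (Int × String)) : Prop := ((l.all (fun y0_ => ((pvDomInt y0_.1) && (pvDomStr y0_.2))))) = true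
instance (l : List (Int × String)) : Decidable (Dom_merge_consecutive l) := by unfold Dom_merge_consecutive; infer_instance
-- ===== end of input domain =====

-- B replaces A's running prev/curr_text/curr_toks accumulator with a run-at-a-time
-- decomposition (scan out each maximal consecutive-number run, build the group from it);
-- same cost, alternative structure.


-- ===== PORT A =====
-- state: (prev_num, curr_text, curr_toks, ans)
def mcStepA (st : Int × String × List Int × List (List Int × String)) (p : Int × String) :
    Int × String × List Int × List (List Int × String) :=
  let (prev, txt, toks, ans) := st
  if prev = p.1 - 1 then
    (p.1, txt ++ " " ++ p.2, toks ++ [p.1], ans)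
  else
    (p.1, p.2, [p.1], if toks.length > 0 then ans ++ [(toks, PySem.Str.strip txt)] else ans)

def mcFlush (st : Int × String × List Int × List (List Int × String)) :
    List (List Int × String) :=
  let (_, txt, toks, ans) := st
  if toks.length > 0 then ans ++ [(toks, PySem.Str.strip txt)] else ans

def merge_consecutive (l : List (Int × String)) : List (List Int × String) :=
  mcFlush (l.foldl mcStepA (-1, "", [], []))

-- ===== PORT B =====
-- inner while loop: split off the rest of the run whose previous number is `prev`
def mcRun (prev : Int) : List (Int × String) → List (Int × String) × List (Int × String)
  | [] => ([], [])
  | (n, t) :: rest =>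
    if n = prev + 1 then
      let (r, rem) := mcRun n rest
      ((n, t) :: r, rem)
    else ([], (n, t) :: rest)

theorem mcRun_rem_len (prev : Int) (l : List (Int × String)) :
    (mcRun prev l).2.length ≤ l.length := by
  induction l generalizing prev with
  | nil => simp [mcRun]
  | cons p rest ih =>
    obtain ⟨n, t⟩ := p
    simp only [mcRun]
    split
    · simpa using Nat.le_succ_of_le (ih n)
    · simp

-- ' '.join(texts), ported step for step (first element, then sep+element folds)
def mcJoin : List String → String
  | [] => ""
  | t :: ts => ts.foldl (fun a s => a ++ " " ++ s) t

-- outer while loop: one group per maximal consecutive run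
def merge_consecutive_alt : List (Int × String) → List (List Int × String)
  | [] => []
  | (n, t) :: rest =>
    let run := (n, t) :: (mcRun n rest).1
    (run.map Prod.fst, PySem.Str.strip (mcJoin (run.map Prod.snd))) ::
      merge_consecutive_alt (mcRun n rest).2
termination_by l => l.length
decreasing_by
  simpa using Nat.lt_succ_of_le (mcRun_rem_len n rest)

-- ===== PRECONDITION & SPEC =====
def Spec_merge_consecutive (l : List (Int × String)) (out : List (List Int × String)) : Prop := out = merge_consecutive_alt l
instance (l : List (Int × String)) (out : List (List Int × String)) : Decidable (Spec_merge_consecutive l out) := by unfold Spec_merge_consecutive; infer_instance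

-- ===== CLAIM (what is proved, stated in full; the proofs are below) =====
def Claim_equal_merge_consecutive : Prop := ∀ (l : List (Int × String)), Dom_merge_consecutive l → Spec_merge_consecutive l (merge_consecutive l)

-- ===== LEMMAS AND PROOFS =====

@[simp] theorem alt_nil : merge_consecutive_alt [] = [] := by
  rw [merge_consecutive_alt]

theorem alt_cons (n : Int) (t : String) (rest : List (Int × String)) :
    merge_consecutive_alt ((n, t) :: rest) =
      (((n, t) :: (mcRun n rest).1).map Prod.fst,
        PySem.Str.strip (mcJoin (((n, t) :: (mcRun n rest).1).map Prod.snd))) ::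
        merge_consecutive_alt (mcRun n rest).2 := by
  rw [merge_consecutive_alt]

theorem mcRun_cons_pos {prev n : Int} (t : String) (rest : List (Int × String))
    (h : n = prev + 1) :
    mcRun prev ((n, t) :: rest) = ((n, t) :: (mcRun n rest).1, (mcRun n rest).2) := by
  simp [mcRun, h]

theorem mcRun_cons_neg {prev n : Int} (t : String) (rest : List (Int × String))
    (h : ¬ n = prev + 1) :
    mcRun prev ((n, t) :: rest) = ([], (n, t) :: rest) := by
  simp [mcRun, h]

-- main loop invariant: from a state with a nonempty current group, A's remaining loop
-- consumes exactly the run mcRun returns and then agrees with B's recursion.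
theorem mc_loop (l : List (Int × String)) :
    ∀ (prev : Int) (txt : String) (toks : List Int) (ans : List (List Int × String)),
    toks ≠ [] →
    mcFlush (l.foldl mcStepA (prev, txt, toks, ans)) =
      ans ++ (toks ++ (mcRun prev l).1.map Prod.fst,
              PySem.Str.strip (((mcRun prev l).1.map Prod.snd).foldl
                (fun a s => a ++ " " ++ s) txt)) ::
        merge_consecutive_alt (mcRun prev l).2 := by
  induction l with
  | nil =>
    intro prev txt toks ans h
    simp [mcRun, mcFlush, List.length_pos_iff, h]
  | cons p rest ih =>
    intro prev txt toks ans h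
    obtain ⟨n, t⟩ := p
    by_cases hc : prev = n - 1
    · have hn : n = prev + 1 := by omega
      rw [mcRun_cons_pos t rest hn]
      simp only [List.foldl_cons, mcStepA]
      rw [if_pos hc]
      rw [ih n (txt ++ " " ++ t) (toks ++ [n]) ans (by simp)]
      simp
    · have hn : ¬ n = prev + 1 := by omega
      rw [mcRun_cons_neg t rest hn]
      simp only [List.foldl_cons, mcStepA]
      rw [if_neg hc, if_pos (by simp [List.length_pos_iff, h])]
      rw [ih n t [n] (ans ++ [(toks, PySem.Str.strip txt)]) (by simp)]
      rw [alt_cons]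
      simp [mcJoin]

-- a leading space added by A's first-iteration quirk (prev_num = -1 matching num = 0)
-- is removed by strip
theorem strip_space_cons (s : String) :
    PySem.Str.strip (" " ++ s) = PySem.Str.strip s := by
  have h1 : (" " ++ s).toList = ' ' :: s.toList := by simp
  have h0 := PySem.Str.toList_strip (" " ++ s)
  have h2 := PySem.Str.toList_strip s
  apply String.toList_injective
  rw [h0, h2, h1]
  simp [PySem.Chars.strip, PySem.Chars.lstrip, PySem.Chars.isspace]

theorem foldl_sp_prefix (ts : List String) (x s : String) :
    ts.foldl (fun a s => a ++ " " ++ s) (x ++ s) =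
      x ++ ts.foldl (fun a s => a ++ " " ++ s) s := by
  induction ts generalizing s with
  | nil => rfl
  | cons u us ih =>
    simp only [List.foldl_cons]
    rw [← ih (s ++ " " ++ u)]
    simp [String.append_assoc]

-- ===== VERDICT (by name: the statement is the Claim_ definition above) =====
theorem merge_consecutive_spec : Claim_equal_merge_consecutive := by
  intro l _
  unfold Spec_merge_consecutive merge_consecutive
  match l with
  | [] => simp [mcFlush]
  | (n, t) :: rest =>
    by_cases hc : (-1 : Int) = n - 1
    · simp only [List.foldl_cons, mcStepA]
      rw [if_pos hc]
      rw [mc_loop rest n ("" ++ " " ++ t) ([] ++ [n]) [] (by simp)]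
      rw [alt_cons]
      simp only [mcJoin, List.nil_append, List.map_cons]
      have he : ("" ++ " " ++ t) = " " ++ t := by simp
      rw [he, foldl_sp_prefix _ " " t, strip_space_cons]
      simp
    · simp only [List.foldl_cons, mcStepA]
      rw [if_neg hc, if_neg (by simp)]
      rw [mc_loop rest n t [n] [] (by simp)]
      rw [alt_cons]
      simp [mcJoin]
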